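-- pv_equiv track=rewrite | github.com/aggressor-FZX/Agentic_Work_Shop | dashboard/app.py | determine_target_files
-- ===== SOURCE A (Python) =====
-- def determine_target_files(instruction, clean_line):
--     """Determine appropriate target files based on instruction"""
--     instruction_lower = instruction.lower()
--     clean_lower = clean_line.lower()
--
--     # File type patterns (using the standard project structure we create)
--     if any(keyword in instruction_lower for keyword in ['api', 'endpoint', 'server', 'backend']):
--         return ['src/api/main.py', 'src/api/routes.py']
--     elif any(keyword in instruction_lower for keyword in ['ui', 'interface', 'component', 'frontend', 'web']):
--         return ['src/frontend/index.html', 'src/frontend/style.css', 'src/frontend/script.js']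
--     elif any(keyword in instruction_lower for keyword in ['database', 'model', 'schema', 'sql']):
--         return ['src/database/models.py', 'src/database/migrations.py']
--     elif any(keyword in instruction_lower for keyword in ['test', 'testing', 'spec']):
--         return ['tests/test_implementation.py', 'tests/conftest.py']
--     elif any(keyword in instruction_lower for keyword in ['config', 'configuration', 'settings']):
--         return ['config/settings.py', 'config/environment.py']
--     elif any(keyword in instruction_lower for keyword in ['auth', 'login', 'user', 'authentication']):
--         return ['src/auth/user.py', 'src/auth/middleware.py', 'src/auth/routes.py']
--     elif any(keyword in instruction_lower for keyword in ['docker', 'deploy', 'deployment']):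
--         return ['Dockerfile', 'docker-compose.yml', 'deploy.sh']
--     else:
--         return ['src/main.py', 'src/utils.py']
-- ===== SOURCE B (Python) =====
-- PATTERNS = [
--     (['api', 'endpoint', 'server', 'backend'],
--      ['src/api/main.py', 'src/api/routes.py']),
--     (['ui', 'interface', 'component', 'frontend', 'web'],
--      ['src/frontend/index.html', 'src/frontend/style.css', 'src/frontend/script.js']),
--     (['database', 'model', 'schema', 'sql'],
--      ['src/database/models.py', 'src/database/migrations.py']),
--     (['test', 'testing', 'spec'],
--      ['tests/test_implementation.py', 'tests/conftest.py']),
--     (['config', 'configuration', 'settings'],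
--      ['config/settings.py', 'config/environment.py']),
--     (['auth', 'login', 'user', 'authentication'],
--      ['src/auth/user.py', 'src/auth/middleware.py', 'src/auth/routes.py']),
--     (['docker', 'deploy', 'deployment'],
--      ['Dockerfile', 'docker-compose.yml', 'deploy.sh']),
-- ]
-- DEFAULT_FILES = ['src/main.py', 'src/utils.py']
--
-- # Flat keyword -> group-priority map (all keywords are distinct across groups).
-- KEYWORD_GROUP = [(k, i) for i, (kws, _) in enumerate(PATTERNS) for k in kws]
--
--
-- def determine_target_files(instruction, clean_line):
--     """Determine appropriate target files based on instruction"""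
--     il = instruction.lower()
--     # minimum priority among ALL matching keywords (no ordered cascade, no early exit);
--     # the first-matching group of the cascade is exactly the minimum matching index.
--     best = len(PATTERNS)
--     for k, g in KEYWORD_GROUP:
--         if k in il:
--             best = min(best, g)
--     return PATTERNS[best][1] if best < len(PATTERNS) else DEFAULT_FILES
-- ===== Notes on version B (the rewrite author's own statement) =====
-- stated objective: alternative
-- what changed: Replaces the ordered if/elif cascade by a flat keyword->group-index map scanned once to compute the MINIMUM matching group index (no ordered group cascade, no short-circuit), then a single table lookup; correct because the cascade's first matching group is exactly the minimum matching index.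
import Mathlib
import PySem

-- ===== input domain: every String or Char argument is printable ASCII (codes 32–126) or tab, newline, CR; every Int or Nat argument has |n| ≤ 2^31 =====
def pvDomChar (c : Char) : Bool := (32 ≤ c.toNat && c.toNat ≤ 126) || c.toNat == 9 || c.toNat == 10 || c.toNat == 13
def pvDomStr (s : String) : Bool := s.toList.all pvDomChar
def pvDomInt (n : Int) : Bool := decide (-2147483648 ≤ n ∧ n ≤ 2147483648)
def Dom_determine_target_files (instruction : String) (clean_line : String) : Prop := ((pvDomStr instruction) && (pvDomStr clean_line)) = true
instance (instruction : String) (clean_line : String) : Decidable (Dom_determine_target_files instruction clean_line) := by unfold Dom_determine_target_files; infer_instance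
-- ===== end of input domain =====

-- B replaces the if/elif cascade with a min-matching-index computation over a flat
-- keyword->group map plus one table lookup; objective: alternative.

-- ===== PORT A =====
def determine_target_files (instruction : String) (clean_line : String) : List String :=
  let instruction_lower := PySem.Str.lower instruction
  let _clean_lower := PySem.Str.lower clean_line
  if (["api", "endpoint", "server", "backend"].any fun keyword => PySem.Str.isIn keyword instruction_lower) then
    ["src/api/main.py", "src/api/routes.py"]
  else if (["ui", "interface", "component", "frontend", "web"].any fun keyword => PySem.Str.isIn keyword instruction_lower) then
    ["src/frontend/index.html", "src/frontend/style.css", "src/frontend/script.js"]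
  else if (["database", "model", "schema", "sql"].any fun keyword => PySem.Str.isIn keyword instruction_lower) then
    ["src/database/models.py", "src/database/migrations.py"]
  else if (["test", "testing", "spec"].any fun keyword => PySem.Str.isIn keyword instruction_lower) then
    ["tests/test_implementation.py", "tests/conftest.py"]
  else if (["config", "configuration", "settings"].any fun keyword => PySem.Str.isIn keyword instruction_lower) then
    ["config/settings.py", "config/environment.py"]
  else if (["auth", "login", "user", "authentication"].any fun keyword => PySem.Str.isIn keyword instruction_lower) then
    ["src/auth/user.py", "src/auth/middleware.py", "src/auth/routes.py"]
  else if (["docker", "deploy", "deployment"].any fun keyword => PySem.Str.isIn keyword instruction_lower) then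
    ["Dockerfile", "docker-compose.yml", "deploy.sh"]
  else
    ["src/main.py", "src/utils.py"]

-- ===== PORT B =====
def pvPatterns : List (List String × List String) :=
  [ (["api", "endpoint", "server", "backend"],
     ["src/api/main.py", "src/api/routes.py"]),
    (["ui", "interface", "component", "frontend", "web"],
     ["src/frontend/index.html", "src/frontend/style.css", "src/frontend/script.js"]),
    (["database", "model", "schema", "sql"],
     ["src/database/models.py", "src/database/migrations.py"]),
    (["test", "testing", "spec"],
     ["tests/test_implementation.py", "tests/conftest.py"]),
    (["config", "configuration", "settings"],
     ["config/settings.py", "config/environment.py"]),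
    (["auth", "login", "user", "authentication"],
     ["src/auth/user.py", "src/auth/middleware.py", "src/auth/routes.py"]),
    (["docker", "deploy", "deployment"],
     ["Dockerfile", "docker-compose.yml", "deploy.sh"]) ]

def pvDefaultFiles : List String := ["src/main.py", "src/utils.py"]

-- KEYWORD_GROUP = [(k, i) for i, (kws, _) in enumerate(PATTERNS) for k in kws]
def pvKeywordGroup : List (String × Nat) :=
  pvPatterns.zipIdx.flatMap (fun p => p.1.1.map (fun k => (k, p.2)))

-- the 'best = len(PATTERNS); for k, g in KEYWORD_GROUP: if k in il: best = min(best, g)' loop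
def determine_target_files_alt (instruction : String) (clean_line : String) : List String :=
  let il := PySem.Str.lower instruction
  let best := pvKeywordGroup.foldl
    (fun best kg => if PySem.Str.isIn kg.1 il then Nat.min best kg.2 else best)
    pvPatterns.length
  if best < pvPatterns.length then ((pvPatterns.getD best ([], [])).2) else pvDefaultFiles

-- ===== PRECONDITION & SPEC =====
def Spec_determine_target_files (instruction : String) (clean_line : String) (out : List String) : Prop := out = determine_target_files_alt instruction clean_line
instance (instruction : String) (clean_line : String) (out : List String) : Decidable (Spec_determine_target_files instruction clean_line out) := by unfold Spec_determine_target_files; infer_instance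

-- ===== CLAIM =====
def Claim_equal_determine_target_files : Prop := ∀ (instruction : String) (clean_line : String), Dom_determine_target_files instruction clean_line → Spec_determine_target_files instruction clean_line (determine_target_files instruction clean_line)

-- ===== LEMMAS AND PROOFS =====

-- folding the min-update step over one keyword group (all pairs carrying index i)
theorem pvFoldSeg (p : String → Bool) (ks : List String) (i acc : Nat) :
    (ks.map (fun k => (k, i))).foldl
      (fun best kg => if p kg.1 then Nat.min best kg.2 else best) acc
    = if ks.any p then Nat.min acc i else acc := by
  induction ks generalizing acc with
  | nil => simp
  | cons k ks ih =>
    simp only [List.map_cons, List.foldl_cons, List.any_cons]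
    by_cases h : p k
    · by_cases h2 : ks.any p <;> simp [h, h2, ih]
    · simp [h, ih]

theorem pvKeywordGroup_eq :
    pvKeywordGroup =
      (["api", "endpoint", "server", "backend"].map (fun k => (k, 0))) ++
      (["ui", "interface", "component", "frontend", "web"].map (fun k => (k, 1))) ++
      (["database", "model", "schema", "sql"].map (fun k => (k, 2))) ++
      (["test", "testing", "spec"].map (fun k => (k, 3))) ++
      (["config", "configuration", "settings"].map (fun k => (k, 4))) ++
      (["auth", "login", "user", "authentication"].map (fun k => (k, 5))) ++
      (["docker", "deploy", "deployment"].map (fun k => (k, 6))) := rfl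

theorem pvFoldSegIsIn (il : String) (ks : List String) (i acc : Nat) :
    (ks.map (fun k => (k, i))).foldl
      (fun best kg => if PySem.Str.isIn kg.1 il then Nat.min best kg.2 else best) acc
    = if ks.any (fun k => PySem.Str.isIn k il) then Nat.min acc i else acc :=
  pvFoldSeg (fun k => PySem.Str.isIn k il) ks i acc

-- ===== VERDICT =====
set_option maxHeartbeats 1000000 in
theorem determine_target_files_spec : Claim_equal_determine_target_files := by
  intro instruction clean_line _
  show _ = _
  simp only [determine_target_files, determine_target_files_alt, pvKeywordGroup_eq,
    List.foldl_append, pvFoldSegIsIn]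
  by_cases h0 : (["api", "endpoint", "server", "backend"].any fun k => PySem.Str.isIn k (PySem.Str.lower instruction)) <;>
    by_cases h1 : (["ui", "interface", "component", "frontend", "web"].any fun k => PySem.Str.isIn k (PySem.Str.lower instruction)) <;>
    by_cases h2 : (["database", "model", "schema", "sql"].any fun k => PySem.Str.isIn k (PySem.Str.lower instruction)) <;>
    by_cases h3 : (["test", "testing", "spec"].any fun k => PySem.Str.isIn k (PySem.Str.lower instruction)) <;>
    by_cases h4 : (["config", "configuration", "settings"].any fun k => PySem.Str.isIn k (PySem.Str.lower instruction)) <;>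
    by_cases h5 : (["auth", "login", "user", "authentication"].any fun k => PySem.Str.isIn k (PySem.Str.lower instruction)) <;>
    by_cases h6 : (["docker", "deploy", "deployment"].any fun k => PySem.Str.isIn k (PySem.Str.lower instruction)) <;>
    simp only [h0, h1, h2, h3, h4, h5, h6, if_true, if_false, Bool.false_eq_true] <;>
    norm_num [pvPatterns, pvDefaultFiles]
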